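-- pv_equiv track=rewrite | github.com/chanbi-raining/TIL | 2019-02-10 algorithm implementation_1x1 size square.py | cnt_square
-- ===== SOURCE A (Python) =====
-- def gridify(moves):
--     grid = (0, 0)
--     grids = {grid}
--     edges = set()
--     for i in moves:
--         if i == 'U':
--             edge = (grid[0], grid[1], grid[0], grid[1] + 1)
--             grid = edge[-2:]
--         elif i == 'D':
--             edge = (grid[0], grid[1] - 1, grid[0], grid[1])
--             grid = edge[:2]
--         elif i == 'R':
--             edge = (grid[0], grid[1], grid[0] + 1, grid[1])
--             grid = edge[-2:]
--         else:
--             edge = (grid[0] - 1, grid[1], grid[0], grid[1])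
--             grid = edge[:2]
--         grids.add(grid)
--         edges.add(edge)
--     return sorted(list(grids)), edges
--
-- def square(pt):
--     ed1 = (pt[0], pt[1], pt[0], pt[1] + 1)
--     ed2 = (pt[0], pt[1] + 1, pt[0] + 1, pt[1] + 1)
--     ed3 = (pt[0], pt[1], pt[0] + 1, pt[1])
--     ed4 = (pt[0] + 1, pt[1], pt[0] + 1, pt[1] + 1)
--     return [ed1, ed2, ed3, ed4]
--
-- def cnt_square(moves):
--     cnt = 0
--     grids, edges = gridify(moves)
--     for pt in grids:
--         sq_grid = square(pt)
--         for s in range(4):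
--             if sq_grid[s] not in edges: break
--             if s == 3: cnt += 1
--     return cnt
-- ===== SOURCE B (Python) =====
-- def cnt_square(moves):
--     # Same traversal to collect unit edges; then tally cells per bounding edge
--     # instead of scanning each visited vertex's four edges.
--     x, y = 0, 0
--     edges = set()
--     for m in moves:
--         if m == 'U':
--             edges.add((x, y, x, y + 1)); y += 1
--         elif m == 'D':
--             y -= 1; edges.add((x, y, x, y + 1))
--         elif m == 'R':
--             edges.add((x, y, x + 1, y)); x += 1
--         else:
--             x -= 1; edges.add((x, y, x + 1, y))
--     tally = {}
--     for (x1, y1, x2, y2) in edges: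
--         if x1 == x2:
--             cells = ((x1, y1), (x1 - 1, y1))
--         else:
--             cells = ((x1, y1), (x1, y1 - 1))
--         for c in cells:
--             tally[c] = tally.get(c, 0) + 1
--     return sum(1 for v in tally.values() if v == 4)
-- ===== Notes on version B (the rewrite author's own statement) =====
-- stated objective: alternative
-- what changed: B keeps A's edge-set traversal but replaces A's per-vertex scan (checking all four square edges of every visited vertex against the edge set) by a single pass over the deduped edges that tallies, in a dict, the two grid cells each edge bounds, returning the number of cells whose tally is 4.
import Mathlib
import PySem

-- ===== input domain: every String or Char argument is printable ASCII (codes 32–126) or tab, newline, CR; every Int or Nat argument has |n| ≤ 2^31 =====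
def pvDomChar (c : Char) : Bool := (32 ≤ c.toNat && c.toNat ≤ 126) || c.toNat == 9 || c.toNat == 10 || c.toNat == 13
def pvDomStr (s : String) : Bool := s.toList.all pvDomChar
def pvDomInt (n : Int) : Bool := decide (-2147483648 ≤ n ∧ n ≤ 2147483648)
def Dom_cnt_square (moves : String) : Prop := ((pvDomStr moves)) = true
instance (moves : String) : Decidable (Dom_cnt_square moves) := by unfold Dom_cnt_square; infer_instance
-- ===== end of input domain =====

-- B replaces A's per-vertex scan of each vertex's four square edges by a per-edge
-- tally of the two grid cells each edge bounds, counting cells whose tally is 4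
-- (objective: alternative decomposition, similar cost).

-- ===== PORT A =====
abbrev PvEdge := Int × Int × Int × Int

def pvStepA (st : (Int × Int) × PySem.Set (Int × Int) × PySem.Set PvEdge) (i : Char) :
    (Int × Int) × PySem.Set (Int × Int) × PySem.Set PvEdge :=
  let x := st.1.1
  let y := st.1.2
  let grid' : Int × Int :=
    if i = 'U' then (x, y + 1)
    else if i = 'D' then (x, y - 1)
    else if i = 'R' then (x + 1, y)
    else (x - 1, y)
  let edge : PvEdge :=
    if i = 'U' then (x, y, x, y + 1)
    else if i = 'D' then (x, y - 1, x, y)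
    else if i = 'R' then (x, y, x + 1, y)
    else (x - 1, y, x, y)
  (grid', PySem.Set.add st.2.1 grid', PySem.Set.add st.2.2 edge)

def gridify (moves : String) : List (Int × Int) × PySem.Set PvEdge :=
  let st := moves.toList.foldl pvStepA ((0, 0), PySem.Set.ofList [((0 : Int), (0 : Int))], PySem.Set.empty)
  (PySem.List.sorted2 st.2.1 Prod.fst Prod.snd, st.2.2)

def pvSquare (pt : Int × Int) : List PvEdge :=
  [(pt.1, pt.2, pt.1, pt.2 + 1),
   (pt.1, pt.2 + 1, pt.1 + 1, pt.2 + 1),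
   (pt.1, pt.2, pt.1 + 1, pt.2),
   (pt.1 + 1, pt.2, pt.1 + 1, pt.2 + 1)]

-- 'for s in range(4): if sq_grid[s] not in edges: break / if s == 3: cnt += 1'
def pvInnerA (sq : List PvEdge) (edges : PySem.Set PvEdge) : List Int → Int
  | [] => 0
  | s :: rest =>
    if ¬ PySem.Set.contains edges (PySem.List.pyGetD sq s (0, 0, 0, 0)) then 0
    else if s = 3 then 1
    else pvInnerA sq edges rest

def cnt_square (moves : String) : Int :=
  let g := gridify moves
  g.1.foldl (fun cnt pt => cnt + pvInnerA (pvSquare pt) g.2 (PySem.List.pyRange 0 4 1)) 0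

-- ===== PORT B =====
def pvStepB (st : (Int × Int) × PySem.Set PvEdge) (m : Char) :
    (Int × Int) × PySem.Set PvEdge :=
  let x := st.1.1
  let y := st.1.2
  if m = 'U' then ((x, y + 1), PySem.Set.add st.2 (x, y, x, y + 1))
  else if m = 'D' then ((x, y - 1), PySem.Set.add st.2 (x, y - 1, x, (y - 1) + 1))
  else if m = 'R' then ((x + 1, y), PySem.Set.add st.2 (x, y, x + 1, y))
  else ((x - 1, y), PySem.Set.add st.2 (x - 1, y, (x - 1) + 1, y))

def pvCells (e : PvEdge) : List (Int × Int) :=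
  if e.1 = e.2.2.1 then [(e.1, e.2.1), (e.1 - 1, e.2.1)]
  else [(e.1, e.2.1), (e.1, e.2.1 - 1)]

def cnt_square_alt (moves : String) : Int :=
  let st := moves.toList.foldl pvStepB ((0, 0), PySem.Set.empty)
  let tally := st.2.foldl
    (fun d e => (pvCells e).foldl (fun d c => PySem.Dict.modify d c 0 (· + 1)) d)
    (PySem.Dict.empty : PySem.Dict (Int × Int) Int)
  ((PySem.Dict.values tally).countP (fun v => v == 4) : Int)

-- ===== PRECONDITION & SPEC =====
def Spec_cnt_square (moves : String) (out : Int) : Prop := out = cnt_square_alt moves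
instance (moves : String) (out : Int) : Decidable (Spec_cnt_square moves out) := by unfold Spec_cnt_square; infer_instance

-- ===== CLAIM (what is proved, stated in full; the proofs are below) =====
def Claim_equal_cnt_square : Prop := ∀ (moves : String), Dom_cnt_square moves → Spec_cnt_square moves (cnt_square moves)

-- ===== LEMMAS AND PROOFS =====

-- all four boundary edges of cell pt are in E
def pvFull (E : List PvEdge) (pt : Int × Int) : Bool :=
  (pvSquare pt).all (fun e => PySem.Set.contains E e)

-- an edge produced by the traversal: unit-length, axis-aligned, canonical order
def pvShape (e : PvEdge) : Prop :=
  (e.2.2.1 = e.1 ∧ e.2.2.2 = e.2.1 + 1) ∨ (e.2.2.2 = e.2.1 ∧ e.2.2.1 = e.1 + 1)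

-- invariant of A's fold: position is visited, both lists are sets, every edge is
-- unit-length with both endpoints visited
def pvInv (st : (Int × Int) × PySem.Set (Int × Int) × PySem.Set PvEdge) : Prop :=
  st.1 ∈ st.2.1 ∧ st.2.1.Nodup ∧ st.2.2.Nodup ∧
  ∀ e ∈ st.2.2, pvShape e ∧ (e.1, e.2.1) ∈ st.2.1 ∧ (e.2.2.1, e.2.2.2) ∈ st.2.1

lemma pvStepA_inv (st : (Int × Int) × PySem.Set (Int × Int) × PySem.Set PvEdge) (c : Char)
    (h : pvInv st) : pvInv (pvStepA st c) := by
  obtain ⟨hp, hgn, hen, he⟩ := h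
  have hp' : (st.1.1, st.1.2) ∈ st.2.1 := by simpa using hp
  unfold pvInv pvStepA
  refine ⟨?_, PySem.Set.nodup_add _ _ hgn, PySem.Set.nodup_add _ _ hen, ?_⟩
  · simp [PySem.Set.mem_add]
  · intro e hme
    rw [PySem.Set.mem_add] at hme
    rcases hme with hme | hme
    · obtain ⟨hs, h1, h2⟩ := he e hme
      exact ⟨hs, by rw [PySem.Set.mem_add]; exact Or.inl h1,
             by rw [PySem.Set.mem_add]; exact Or.inl h2⟩
    · subst hme
      split_ifs <;> simp [pvShape, PySem.Set.mem_add, hp']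

lemma pvFoldA_inv (l : List Char) (st : (Int × Int) × PySem.Set (Int × Int) × PySem.Set PvEdge)
    (h : pvInv st) : pvInv (l.foldl pvStepA st) := by
  induction l generalizing st with
  | nil => exact h
  | cons c l ih => exact ih _ (pvStepA_inv st c h)

-- the two folds track the same position and the same edge set
lemma pvFold_rel (l : List Char) (p : Int × Int) (g : PySem.Set (Int × Int)) (E : PySem.Set PvEdge) :
    (l.foldl pvStepA (p, g, E)).1 = (l.foldl pvStepB (p, E)).1 ∧
    (l.foldl pvStepA (p, g, E)).2.2 = (l.foldl pvStepB (p, E)).2 := by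
  induction l generalizing p g E with
  | nil => exact ⟨rfl, rfl⟩
  | cons c l ih =>
    have hstep : (pvStepA (p, g, E) c).1 = (pvStepB (p, E) c).1 ∧
        (pvStepA (p, g, E) c).2.2 = (pvStepB (p, E) c).2 := by
      unfold pvStepA pvStepB
      split_ifs <;> simp
    have := ih (pvStepB (p, E) c).1 (pvStepA (p, g, E) c).2.1 (pvStepB (p, E) c).2
    simp only [List.foldl_cons]
    rw [show pvStepA (p, g, E) c =
      ((pvStepB (p, E) c).1, (pvStepA (p, g, E) c).2.1, (pvStepB (p, E) c).2) from
      Prod.ext hstep.1 (Prod.ext rfl hstep.2)]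
    exact this

-- A's inner loop counts 1 iff all four edges are present
lemma pvInnerA_eq (pt : Int × Int) (E : PySem.Set PvEdge) :
    pvInnerA (pvSquare pt) E (PySem.List.pyRange 0 4 1) = if pvFull E pt then 1 else 0 := by
  have hr : PySem.List.pyRange 0 4 1 = [0, 1, 2, 3] := by decide
  rw [hr]
  simp only [pvInnerA, pvFull, pvSquare, PySem.List.pyGetD, List.all]
  norm_num [PySem.List.pyIdx?]
  split_ifs <;> simp_all

-- folding cell-bumps over edges is the counter fold of the flattened cell list
lemma pvTally_eq_counter (L : List PvEdge) (d : PySem.Dict (Int × Int) Int) :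
    L.foldl (fun d e => (pvCells e).foldl (fun d c => PySem.Dict.modify d c 0 (· + 1)) d) d
      = (L.flatMap pvCells).foldl (fun d c => PySem.Dict.modify d c 0 (· + 1)) d := by
  induction L generalizing d with
  | nil => rfl
  | cons e L ih => simp [List.flatMap_cons, List.foldl_append, ih]

lemma pvCells_nodup (e : PvEdge) : (pvCells e).Nodup := by
  unfold pvCells
  split_ifs <;> simp [Prod.ext_iff] <;> omega

-- each edge bounds a given cell at most once
lemma pvCells_count (e : PvEdge) (c : Int × Int) :
    (pvCells e).count c = if c ∈ pvCells e then 1 else 0 := by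
  split_ifs with h
  · exact List.count_eq_one_of_mem (pvCells_nodup e) h
  · exact List.count_eq_zero_of_not_mem h

-- for a traversal-shaped edge, bounding the cell c ↔ lying on c's square
lemma pvCells_iff_square (e : PvEdge) (he : pvShape e) (c : Int × Int) :
    c ∈ pvCells e ↔ e ∈ pvSquare c := by
  rcases e with ⟨x, y, z, w⟩
  rcases c with ⟨a, b⟩
  unfold pvShape at he
  simp only at he
  unfold pvCells pvSquare
  rcases he with ⟨h1, h2⟩ | ⟨h1, h2⟩ <;> subst h1 <;> subst h2 <;>
    (simp [Prod.ext_iff]; try omega)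

-- the four edges of a cell are pairwise distinct
lemma pvSquare_nodup (c : Int × Int) : (pvSquare c).Nodup := by
  rcases c with ⟨a, b⟩
  unfold pvSquare
  simp [Prod.ext_iff]

-- counting members of a fixed nodup list inside a nodup list, both ways
lemma pvCountP_swap {α : Type} (L S : List α) (p q : α → Bool) (hL : L.Nodup) (hS : S.Nodup)
    (hp : ∀ a, p a = true ↔ a ∈ S) (hq : ∀ a, q a = true ↔ a ∈ L) :
    L.countP p = S.countP q := by
  rw [List.countP_eq_length_filter, List.countP_eq_length_filter]
  exact List.Perm.length_eq (by
    rw [List.perm_ext_iff_of_nodup (List.Nodup.filter _ hL) (List.Nodup.filter _ hS)]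
    intro a
    simp only [List.mem_filter, hp, hq]
    tauto)

-- two nodup lists both containing every element satisfying p have the same countP
lemma pvCountP_eq_of_mem {α : Type} (l₁ l₂ : List α) (p : α → Bool)
    (h₁ : l₁.Nodup) (h₂ : l₂.Nodup)
    (hmem : ∀ c, p c = true → (c ∈ l₁ ∧ c ∈ l₂)) :
    l₁.countP p = l₂.countP p := by
  rw [List.countP_eq_length_filter, List.countP_eq_length_filter]
  exact List.Perm.length_eq (by
    rw [List.perm_ext_iff_of_nodup (List.Nodup.filter _ h₁) (List.Nodup.filter _ h₂)]
    intro a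
    simp only [List.mem_filter]
    exact ⟨fun ⟨_, hp⟩ => ⟨(hmem a hp).2, hp⟩, fun ⟨_, hp⟩ => ⟨(hmem a hp).1, hp⟩⟩)

-- a cell's total tally counts the edges of E lying on its square
lemma pvCount_flat (E : List PvEdge) (hsh : ∀ e ∈ E, pvShape e) (c : Int × Int) :
    (E.flatMap pvCells).count c = E.countP (fun e => decide (e ∈ pvSquare c)) := by
  induction E with
  | nil => simp
  | cons e E ih =>
    have hs := hsh e (by simp)
    rw [List.flatMap_cons, List.count_append, List.countP_cons,
        ih (fun x hx => hsh x (by simp [hx])), pvCells_count]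
    by_cases h : c ∈ pvCells e
    · simp [h, (pvCells_iff_square e hs c).mp h, Nat.add_comm]
    · have h' : e ∉ pvSquare c := fun hh => h ((pvCells_iff_square e hs c).mpr hh)
      simp [h, h']

-- the tally predicate '== 4' is exactly pvFull
lemma pvKey_pred (E : List PvEdge) (hE : E.Nodup) (hsh : ∀ e ∈ E, pvShape e) (k : Int × Int) :
    ((((E.flatMap pvCells).count k : Int)) == 4) = pvFull E k := by
  have h1 : (E.flatMap pvCells).count k = (pvSquare k).countP (fun e => decide (e ∈ E)) := by
    rw [pvCount_flat E hsh k]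
    exact pvCountP_swap E (pvSquare k) _ _ hE (pvSquare_nodup k)
      (fun a => by simp) (fun a => by simp)
  have hlen : (pvSquare k).length = 4 := rfl
  have h2 : ((pvSquare k).countP (fun e => decide (e ∈ E)) = 4)
      ↔ (pvFull E k = true) := by
    unfold pvFull
    rw [← hlen, List.countP_eq_length, List.all_eq_true]
    constructor
    · intro h e hme
      rw [PySem.Set.contains_iff]
      simpa using h e hme
    · intro h e hme
      simpa using (PySem.Set.contains_iff E e).mp (h e hme)
  rw [h1]
  cases hfull : pvFull E k with
  | false =>
    simp only [beq_eq_false_iff_ne, ne_eq]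
    intro hc
    have : (pvSquare k).countP (fun e => decide (e ∈ E)) = 4 := by exact_mod_cast hc
    rw [hfull] at h2
    simp_all
  | true =>
    have := h2.mpr hfull
    simp [this]

-- the initial state of A's fold satisfies the invariant
lemma pvInv_init : pvInv ((0, 0), PySem.Set.ofList [((0 : Int), (0 : Int))], PySem.Set.empty) := by
  refine ⟨?_, ?_, ?_, ?_⟩ <;> simp [PySem.Set.ofList, PySem.Set.empty, PySem.Set.add]

theorem cnt_square_spec : Claim_equal_cnt_square := by
  intro moves _
  unfold Spec_cnt_square
  simp only [cnt_square, cnt_square_alt, gridify]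
  set l := moves.toList with hl
  set stA := l.foldl pvStepA ((0, 0), PySem.Set.ofList [((0 : Int), (0 : Int))], PySem.Set.empty) with hstA
  set stB := l.foldl pvStepB ((0, 0), PySem.Set.empty) with hstB
  obtain ⟨-, hE⟩ := pvFold_rel l (0, 0) (PySem.Set.ofList [((0 : Int), (0 : Int))]) PySem.Set.empty
  obtain ⟨-, hGn, hEn, hinv⟩ := pvFoldA_inv l _ pvInv_init
  set G := stA.2.1 with hG
  set E := stA.2.2 with hEdef
  set X := E.flatMap pvCells with hX
  -- A side: the per-vertex loop is a countP of pvFull over the visited vertices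
  have hfun : (fun (cnt : Int) pt => cnt + pvInnerA (pvSquare pt) E (PySem.List.pyRange 0 4 1))
      = fun cnt pt => cnt + (if pvFull E pt then 1 else 0) := by
    funext cnt pt
    rw [pvInnerA_eq]
  have hA : (PySem.List.sorted2 G Prod.fst Prod.snd false).foldl
      (fun cnt pt => cnt + pvInnerA (pvSquare pt) E (PySem.List.pyRange 0 4 1)) 0
      = (G.countP (fun pt => pvFull E pt) : Int) := by
    rw [hfun, PySem.List.foldl_add, PySem.List.sum_map_ite_one_zero, zero_add,
      (PySem.List.sorted2_perm G Prod.fst Prod.snd false).countP_eq]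
  -- B side: the tally loop is the counter of X; its value filter is pvFull over the keys
  have hB : stB.2.foldl
      (fun d e => (pvCells e).foldl (fun d c => PySem.Dict.modify d c 0 (· + 1)) d)
      (PySem.Dict.empty : PySem.Dict (Int × Int) Int) = PySem.Dict.counter X := by
    rw [← hE, pvTally_eq_counter, ← hX, PySem.Dict.counter_eq_foldl]
  have hvals : PySem.Dict.values (PySem.Dict.counter X)
      = (PySem.Set.ofList X).map (fun k => ((X.count k : Int))) := by
    show (PySem.Dict.counter X).items.map (·.2) = _
    rw [PySem.Dict.items_counter]
    simp [List.map_map, Function.comp]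
  have hsh : ∀ e ∈ E, pvShape e := fun e he => (hinv e he).1
  have hpred : ∀ k, (((X.count k : Int)) == 4) = pvFull E k := fun k => pvKey_pred E hEn hsh k
  have hBcount : (PySem.Set.ofList X).countP (fun k => ((X.count k : Int)) == 4)
      = (PySem.Set.ofList X).countP (fun k => pvFull E k) :=
    List.countP_congr (fun k _ => by rw [hpred k])
  -- the two countP's agree: every full cell is both a key and a visited vertex
  have hmem : ∀ c, pvFull E c = true → (c ∈ PySem.Set.ofList X ∧ c ∈ G) := by
    intro c hc
    unfold pvFull at hc
    rw [List.all_eq_true] at hc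
    have hed1 : (c.1, c.2, c.1, c.2 + 1) ∈ E := by
      have := hc (c.1, c.2, c.1, c.2 + 1) (by simp [pvSquare])
      rw [PySem.Set.contains_iff] at this
      exact this
    constructor
    · rw [PySem.Set.mem_ofList, hX, List.mem_flatMap]
      exact ⟨(c.1, c.2, c.1, c.2 + 1), hed1, by simp [pvCells]⟩
    · have := (hinv _ hed1).2.1
      simpa using this
  have hfinal : (PySem.Set.ofList X).countP (fun k => pvFull E k)
      = G.countP (fun pt => pvFull E pt) :=
    pvCountP_eq_of_mem _ _ _ (PySem.Set.nodup_ofList X) hGn hmem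
  rw [hA, hB, hvals, List.countP_map]
  have : ((fun v => v == 4) ∘ fun k => ((X.count k : Int))) = fun k => ((X.count k : Int)) == 4 := rfl
  rw [this, hBcount, hfinal]
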